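-- pv_equiv track=rewrite | github.com/joelucwag-boop/ROTC-web-app | utils/gutils.py | _merge_two_matrices_union
-- ===== SOURCE A (Python) =====
-- from typing import List, Dict
-- from typing import List, Dict
-- from typing import List, Dict, Any, Tuple
--
-- def _header_union(h1: List[str], h2: List[str]) -> List[str]:
--     """
--     Returns the union of two headers, keeping order of h1 then any new from h2.
--     """
--     out = list(h1)
--     for x in h2:
--         if x not in out:
--             out.append(x)
--     return out
--
-- def _row_to_dict(row: List[str], header: List[str]) -> Dict[str, str]:
--     return {header[i]: (row[i] if i < len(row) else "") for i in range(len(header))}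
--
-- def _dict_to_row(d: Dict[str, str], header: List[str]) -> List[str]:
--     return [d.get(col, "") for col in header]
--
-- def _merge_two_matrices_union(df1: List[List[str]], df2: List[List[str]]) -> List[List[str]]:
--     """
--     Concatenate two matrices by UNION of headers. Rows are simply appended
--     (we don't try to de-duplicate cadets). Good enough for reporting.
--     """
--     if not df1 and not df2:
--         return []
--     if not df1:
--         return df2
--     if not df2:
--         return df1
--
--     h1 = df1[0]
--     h2 = df2[0]
--     header = _header_union(h1, h2)
--
--     def expand(df: List[List[str]]) -> List[List[str]]:
--         out = [header]
--         for r in df[1:]: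
--             d = _row_to_dict(r, df[0])
--             out.append(_dict_to_row(d, header))
--         return out
--
--     e1 = expand(df1)
--     e2 = expand(df2)
--     # combine: header + rows1 + rows2
--     return [header] + e1[1:] + e2[1:]
-- ===== SOURCE B (Python) =====
-- from typing import List
--
--
-- def _merge_two_matrices_union(df1: List[List[str]], df2: List[List[str]]) -> List[List[str]]:
--     if not df1 and not df2:
--         return []
--     if not df1:
--         return df2
--     if not df2:
--         return df1
--
--     h1, h2 = df1[0], df2[0]
--     seen, extra = set(h1), []
--     for x in h2:
--         if x not in seen:
--             seen.add(x)
--             extra.append(x)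
--     header = h1 + extra
--
--     def project(df):
--         own = df[0]
--         last = {}
--         for i in range(len(own)):
--             last[own[i]] = i
--         ps = [last.get(col) for col in header]
--         return [[r[p] if p is not None and p < len(r) else "" for p in ps]
--                 for r in df[1:]]
--
--     return [header] + project(df1) + project(df2)
-- ===== Notes on version B (the rewrite author's own statement) =====
-- stated objective: alternative
-- what changed: Instead of building a fresh column->value dict for every data row and reading it back per header column (A), B computes once per matrix the last-occurrence index of each union-header column in that matrix's own header and projects every row by direct indexing, with a seen-set building the header union.
import Mathlib
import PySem

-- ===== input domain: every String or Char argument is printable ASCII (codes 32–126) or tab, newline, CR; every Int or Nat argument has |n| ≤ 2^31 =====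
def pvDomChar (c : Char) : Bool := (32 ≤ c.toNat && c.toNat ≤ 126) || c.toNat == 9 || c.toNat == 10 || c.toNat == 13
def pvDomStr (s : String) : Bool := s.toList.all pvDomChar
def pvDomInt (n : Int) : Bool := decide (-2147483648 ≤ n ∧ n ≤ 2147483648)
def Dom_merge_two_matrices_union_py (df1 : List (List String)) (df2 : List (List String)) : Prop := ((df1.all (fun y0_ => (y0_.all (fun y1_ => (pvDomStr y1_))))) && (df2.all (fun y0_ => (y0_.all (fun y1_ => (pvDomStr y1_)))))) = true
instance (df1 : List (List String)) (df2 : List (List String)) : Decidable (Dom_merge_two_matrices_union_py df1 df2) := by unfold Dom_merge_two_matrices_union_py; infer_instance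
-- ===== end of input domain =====

-- ===== PORT A =====
-- B replaces A's per-row dict construction by per-matrix precomputed last-occurrence
-- column positions (objective: alternative decomposition; same asymptotic cost).

-- port of _header_union
def pvHeaderUnion (h1 h2 : List String) : List String :=
  h2.foldl (fun out x => if x ∈ out then out else out ++ [x]) h1

-- port of _row_to_dict ({header[i]: (row[i] if i < len(row) else "") for i in range(len(header))})
def pvRowToDict (row : List String) (header : List String) : PySem.Dict String String :=
  (List.range header.length).foldl
    (fun d i => d.insert (header.getD i "") (if i < row.length then row.getD i "" else ""))
    PySem.Dict.empty

-- port of _dict_to_row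
def pvDictToRow (d : PySem.Dict String String) (header : List String) : List String :=
  header.map (fun col => d.getD col "")

-- port of the inner 'expand' (out = [header]; for r in df[1:]: out.append(...))
def pvExpand (header : List String) (df : List (List String)) : List (List String) :=
  (df.drop 1).foldl
    (fun out r => out ++ [pvDictToRow (pvRowToDict r (df.headD [])) header])
    [header]

def merge_two_matrices_union_py (df1 : List (List String)) (df2 : List (List String)) : List (List String) :=
  if df1 = [] ∧ df2 = [] then []
  else if df1 = [] then df2
  else if df2 = [] then df1
  else
    let h1 := df1.headD []
    let h2 := df2.headD []
    let header := pvHeaderUnion h1 h2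
    let e1 := pvExpand header df1
    let e2 := pvExpand header df2
    [header] ++ e1.drop 1 ++ e2.drop 1

-- ===== PORT B =====
-- seen/extra loop of Source B: fold over h2 with state (seen : set, extra : list)
def pvNewCols (h1 h2 : List String) : List String :=
  (h2.foldl
    (fun (st : PySem.Set String × List String) x =>
      if x ∈ st.1 then st else (PySem.Set.add st.1 x, st.2 ++ [x]))
    (PySem.Set.ofList h1, [])).2

-- last[own[i]] = i  for i in range(len(own))
def pvLastPosDict (own : List String) : PySem.Dict String Nat :=
  (List.range own.length).foldl
    (fun d i => d.insert (own.getD i "") i)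
    PySem.Dict.empty

-- ps = [last.get(col) for col in header]
def pvPositions (header own : List String) : List (Option Nat) :=
  header.map (fun col => (pvLastPosDict own).get? col)

-- project(df): rows of df[1:] mapped through the precomputed positions of df[0]
def pvProject (header : List String) (df : List (List String)) : List (List String) :=
  let ps := pvPositions header (df.headD [])
  (df.drop 1).map (fun r =>
    ps.map (fun p? => match p? with
      | some p => if p < r.length then r.getD p "" else ""
      | none => ""))

def merge_two_matrices_union_py_alt (df1 : List (List String)) (df2 : List (List String)) : List (List String) :=
  if df1 = [] ∧ df2 = [] then []
  else if df1 = [] then df2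
  else if df2 = [] then df1
  else
    let h1 := df1.headD []
    let h2 := df2.headD []
    let header := h1 ++ pvNewCols h1 h2
    [header] ++ pvProject header df1 ++ pvProject header df2

-- ===== PRECONDITION & SPEC =====
def Spec_merge_two_matrices_union_py (df1 : List (List String)) (df2 : List (List String)) (out : List (List String)) : Prop := out = merge_two_matrices_union_py_alt df1 df2
instance (df1 : List (List String)) (df2 : List (List String)) (out : List (List String)) : Decidable (Spec_merge_two_matrices_union_py df1 df2 out) := by unfold Spec_merge_two_matrices_union_py; infer_instance

-- ===== CLAIM (what is proved, stated in full; the proofs are below) =====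
def Claim_equal_merge_two_matrices_union_py : Prop := ∀ (df1 : List (List String)) (df2 : List (List String)), Dom_merge_two_matrices_union_py df1 df2 → Spec_merge_two_matrices_union_py df1 df2 (merge_two_matrices_union_py df1 df2)

-- ===== LEMMAS AND PROOFS =====

-- The two header computations agree: A's growing-list membership fold equals
-- the prefix plus the new columns collected with B's seen-set.
theorem headerUnion_eq_aux (h2 : List String) :
    ∀ (seen : PySem.Set String) (acc ex : List String),
      (∀ x, x ∈ seen ↔ x ∈ acc ++ ex) →
      h2.foldl (fun out x => if x ∈ out then out else out ++ [x]) (acc ++ ex) =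
        acc ++ (h2.foldl
          (fun (st : PySem.Set String × List String) x =>
            if x ∈ st.1 then st else (PySem.Set.add st.1 x, st.2 ++ [x]))
          (seen, ex)).2 := by
  induction h2 with
  | nil => intro seen acc ex h; simp
  | cons x xs ih =>
    intro seen acc ex h
    simp only [List.foldl_cons]
    by_cases hx : x ∈ acc ++ ex
    · have hs : x ∈ seen := (h x).mpr hx
      simp only [hx, if_pos, hs]
      exact ih seen acc ex h
    · have hs : x ∉ seen := fun hc => hx ((h x).mp hc)
      simp only [hx, hs, if_false]
      have : acc ++ ex ++ [x] = acc ++ (ex ++ [x]) := by simp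
      rw [this]
      apply ih
      intro y
      rw [PySem.Set.mem_add]
      have hy := h y
      simp only [List.mem_append, List.mem_singleton] at hy ⊢
      tauto

theorem headerUnion_eq (h1 h2 : List String) :
    pvHeaderUnion h1 h2 = h1 ++ pvNewCols h1 h2 := by
  unfold pvHeaderUnion pvNewCols
  have := headerUnion_eq_aux h2 (PySem.Set.ofList h1) h1 []
  simp only [List.append_nil] at this
  apply this
  intro x
  simp [PySem.Set.mem_ofList]

-- Invariant relating A's per-row value dict with B's position dict.
theorem rowDict_rel_aux (r h : List String) (is : List Nat) :
    ∀ (dA : PySem.Dict String String) (dB : PySem.Dict String Nat),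
      (∀ col, dA.get? col =
        (dB.get? col).map (fun p => if p < r.length then r.getD p "" else "")) →
      ∀ col,
        (is.foldl (fun d i => d.insert (h.getD i "")
            (if i < r.length then r.getD i "" else "")) dA).get? col =
        ((is.foldl (fun d i => d.insert (h.getD i "") i) dB).get? col).map
          (fun p => if p < r.length then r.getD p "" else "") := by
  induction is with
  | nil => intro dA dB hrel col; exact hrel col
  | cons i is ih =>
    intro dA dB hrel col
    simp only [List.foldl_cons]
    apply ih
    intro c
    rw [PySem.Dict.get?_insert, PySem.Dict.get?_insert]
    by_cases hc : c = h.getD i ""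
    · simp [hc]
    · rw [if_neg hc, if_neg hc]
      exact hrel c

theorem rowDict_rel (r h : List String) (col : String) :
    (pvRowToDict r h).get? col =
      ((pvLastPosDict h).get? col).map
        (fun p => if p < r.length then r.getD p "" else "") := by
  unfold pvRowToDict pvLastPosDict
  apply rowDict_rel_aux
  intro c
  simp [PySem.Dict.get?_empty]

theorem row_eq (header h r : List String) :
    pvDictToRow (pvRowToDict r h) header =
      (pvPositions header h).map (fun p? => match p? with
        | some p => if p < r.length then r.getD p "" else ""
        | none => "") := by
  unfold pvDictToRow pvPositions
  rw [List.map_map]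
  apply List.map_congr_left
  intro col _
  rw [PySem.Dict.getD_eq_get?_getD, rowDict_rel]
  cases hget : (pvLastPosDict h).get? col <;> simp [hget]

theorem expand_drop_eq (header : List String) (df : List (List String)) :
    (pvExpand header df).drop 1 = pvProject header df := by
  unfold pvExpand pvProject
  rw [PySem.List.foldl_append_singleton_eq_map]
  simp only [List.singleton_append, List.drop_succ_cons, List.drop_zero]
  apply List.map_congr_left
  intro r _
  exact row_eq header (df.headD []) r

-- ===== VERDICT (by name: the statement is the Claim_ definition above) =====
theorem merge_two_matrices_union_py_spec : Claim_equal_merge_two_matrices_union_py := by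
  intro df1 df2 _
  unfold Spec_merge_two_matrices_union_py merge_two_matrices_union_py merge_two_matrices_union_py_alt
  split_ifs with h0 h1 h2
  · rfl
  · rfl
  · rfl
  · simp only [headerUnion_eq, expand_drop_eq]
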